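-- pv_equiv track=rewrite | github.com/silveryshine/ITN-data-generation | replace_num/number_replace.py | try_method2
-- ===== SOURCE A (Python) =====
-- def contain_digit(in_str) -> bool:
--     for s in in_str:
--         if s.isdigit():
--             return True
--     return False
--
-- def try_method2(example: str, hypothesis: str) -> str:
--     example_split = example.split()
--     hypothesis_split = hypothesis.split()
--     hypothesis_might_replace = []
--     example_might_replace = []
--     for idx, word in enumerate(example_split):
--         if contain_digit(word):
--             example_might_replace.append(word) #(extract_digit(word))
--     hyp_idx = 0
--     hyp_len = len(hypothesis_split)
--     exp_idx = 0
--     exp_len = len(example_might_replace)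
--     while hyp_idx < hyp_len:
--         if hypothesis_split[hyp_idx] == '<unk>' and exp_idx < exp_len:
--             hypothesis_split[hyp_idx] = str(example_might_replace[exp_idx])
--             exp_idx += 1
--         hyp_idx += 1
--     return ' '.join(hypothesis_split)
-- ===== SOURCE B (Python) =====
-- def split_unk(words):
--     """Split a token list into the segments delimited by '<unk>' tokens
--     (len(result) == number of '<unk>' + 1), by structural recursion."""
--     if not words:
--         return [[]]
--     rest = split_unk(words[1:])
--     if words[0] == '<unk>':
--         return [[]] + rest
--     return [[words[0]] + rest[0]] + rest[1:]
--
-- def interleave(segments, fillers):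
--     """Rejoin the segments, putting the next filler at each former '<unk>'
--     slot and restoring '<unk>' once the fillers run out."""
--     if len(segments) == 1:
--         return segments[0]
--     head = fillers[0] if fillers else '<unk>'
--     return segments[0] + [head] + interleave(segments[1:], fillers[1:] if fillers else [])
--
-- def try_method2(example: str, hypothesis: str) -> str:
--     digit_words = [w for w in example.split() if any(c.isdigit() for c in w)]
--     segments = split_unk(hypothesis.split())
--     return ' '.join(interleave(segments, digit_words))
-- ===== Notes on version B (the rewrite author's own statement) =====
-- stated objective: alternative
-- what changed: Instead of A's two-counter while loop mutating tokens by index, B splits the hypothesis token list into the segments delimited by '<unk>' (a recursive split-on-separator) and rebuilds the sentence by interleaving those segments with the digit-words, restoring '<unk>' when the digit-words run out.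
import Mathlib
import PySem

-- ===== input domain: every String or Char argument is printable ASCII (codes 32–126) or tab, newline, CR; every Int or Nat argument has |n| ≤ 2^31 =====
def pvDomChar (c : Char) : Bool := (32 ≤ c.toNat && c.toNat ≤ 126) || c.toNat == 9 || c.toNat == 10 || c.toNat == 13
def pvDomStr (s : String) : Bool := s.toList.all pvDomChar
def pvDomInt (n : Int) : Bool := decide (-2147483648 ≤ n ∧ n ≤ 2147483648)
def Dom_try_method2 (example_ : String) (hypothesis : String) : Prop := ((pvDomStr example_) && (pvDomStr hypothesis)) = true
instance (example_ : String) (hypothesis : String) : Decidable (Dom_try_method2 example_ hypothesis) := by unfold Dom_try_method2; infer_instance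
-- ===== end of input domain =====

-- B replaces A's index-mutating two-counter while loop by splitting the hypothesis
-- tokens into the segments delimited by '<unk>' and interleaving those segments with
-- the digit-words (alternative decomposition, same cost).

-- ===== PORT A =====
-- contain_digit: A's early-return for loop over the characters
def containDigitA : List Char → Bool
  | [] => false
  | c :: cs => if PySem.Chars.isdigit c then true else containDigitA cs

-- the while loop: mutates hypothesis_split at hyp_idx, advancing exp_idx on each replacement
def whileA (exp : List String) (hyp : List String) (hidx eidx : Nat) : List String :=
  if h : hidx < hyp.length then
    if hyp.getD hidx "" = "<unk>" ∧ eidx < exp.length then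
      whileA exp (hyp.set hidx (exp.getD eidx "")) (hidx + 1) (eidx + 1)
    else
      whileA exp hyp (hidx + 1) eidx
  else hyp
termination_by hyp.length - hidx
decreasing_by all_goals simp_all; omega

def try_method2 (example_ : String) (hypothesis : String) : String :=
  let example_split := PySem.Str.split₀ example_
  let hypothesis_split := PySem.Str.split₀ hypothesis
  let _hypothesis_might_replace : List String := []
  let example_might_replace :=
    example_split.foldl (fun acc word => if containDigitA word.toList then acc ++ [word] else acc) []
  PySem.Str.join " " (whileA example_might_replace hypothesis_split 0 0)

-- ===== PORT B =====
-- split_unk: segments delimited by '<unk>', by structural recursion (Source B line for line)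
def splitUnkB : List String → List (List String)
  | [] => [[]]
  | w :: ws =>
    let rest := splitUnkB ws
    if w = "<unk>" then [] :: rest
    else (w :: rest.headD []) :: rest.tail

-- interleave: segments rejoined with the next filler at each former '<unk>' slot;
-- Source B is only ever called with a nonempty segment list, the [] case totalises it
def interleaveB : List (List String) → List String → List String
  | [], _ => []
  | [s], _ => s
  | s :: s2 :: rest, [] => s ++ "<unk>" :: interleaveB (s2 :: rest) []
  | s :: s2 :: rest, e :: es => s ++ e :: interleaveB (s2 :: rest) es

def try_method2_alt (example_ : String) (hypothesis : String) : String :=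
  let digit_words :=
    (PySem.Str.split₀ example_).filter (fun w => w.toList.any PySem.Chars.isdigit)
  let segments := splitUnkB (PySem.Str.split₀ hypothesis)
  PySem.Str.join " " (interleaveB segments digit_words)

-- ===== PRECONDITION & SPEC =====
def Spec_try_method2 (example_ : String) (hypothesis : String) (out : String) : Prop := out = try_method2_alt example_ hypothesis
instance (example_ : String) (hypothesis : String) (out : String) : Decidable (Spec_try_method2 example_ hypothesis out) := by unfold Spec_try_method2; infer_instance

-- ===== CLAIM (what is proved, stated in full; the proofs are below) =====
def Claim_equal_try_method2 : Prop := ∀ (example_ : String) (hypothesis : String), Dom_try_method2 example_ hypothesis → Spec_try_method2 example_ hypothesis (try_method2 example_ hypothesis)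

-- ===== LEMMAS AND PROOFS =====

-- the common functional core: replace each '<unk>' by the next remaining word, until words run out
def pvReplace : List String → List String → List String
  | [], _ => []
  | w :: ws, [] => w :: pvReplace ws []
  | w :: ws, e :: es => if w = "<unk>" then e :: pvReplace ws es else w :: pvReplace ws (e :: es)

theorem pvReplace_nil (ws : List String) : pvReplace ws [] = ws := by
  induction ws with
  | nil => rfl
  | cons w ws ih => simp [pvReplace, ih]

theorem containDigitA_eq_any (cs : List Char) : containDigitA cs = cs.any PySem.Chars.isdigit := by
  induction cs with
  | nil => rfl
  | cons c cs ih => by_cases h : PySem.Chars.isdigit c <;> simp [containDigitA, h, ih]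

theorem take_succ_set (l : List String) (i : Nat) (v : String) (h : i < l.length) :
    (l.set i v).take (i + 1) = l.take i ++ [v] := by
  induction l generalizing i with
  | nil => simp at h
  | cons x xs ih =>
    cases i with
    | zero => simp
    | succ j =>
      simp only [List.set_cons_succ, List.take_succ_cons, List.cons_append]
      rw [ih _ (by simpa using h)]

theorem drop_succ_set (l : List String) (i : Nat) (v : String) :
    (l.set i v).drop (i + 1) = l.drop (i + 1) := by
  induction l generalizing i with
  | nil => rfl
  | cons x xs ih =>
    cases i with
    | zero => simp
    | succ j =>
      simp only [List.set_cons_succ, List.drop_succ_cons]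
      exact ih j

-- A's while loop computes pvReplace on the unprocessed suffixes
theorem whileA_eq_replace (exp : List String) (hyp : List String) (hidx eidx : Nat) :
    whileA exp hyp hidx eidx = hyp.take hidx ++ pvReplace (hyp.drop hidx) (exp.drop eidx) := by
  by_cases h : hidx < hyp.length
  · rw [whileA, dif_pos h]
    have hdrop : List.drop hidx hyp = hyp[hidx] :: List.drop (hidx + 1) hyp :=
      List.drop_eq_getElem_cons h
    have hgetD : hyp.getD hidx "" = hyp[hidx] := by
      simp [List.getD, List.getElem?_eq_getElem h]
    by_cases hc : hyp.getD hidx "" = "<unk>" ∧ eidx < exp.length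
    · obtain ⟨hu, he⟩ := hc
      rw [if_pos ⟨hu, he⟩, whileA_eq_replace, take_succ_set _ _ _ h, drop_succ_set]
      have hedrop : List.drop eidx exp = exp[eidx] :: List.drop (eidx + 1) exp :=
        List.drop_eq_getElem_cons he
      have hegetD : exp.getD eidx "" = exp[eidx] := by
        simp [List.getD, List.getElem?_eq_getElem he]
      rw [hdrop, hedrop]
      have hu' : hyp[hidx] = "<unk>" := hgetD ▸ hu
      simp [pvReplace, hu', List.getElem?_eq_getElem he]
    · rw [if_neg hc, whileA_eq_replace, hdrop]
      rcases hed : List.drop eidx exp with _ | ⟨e, es⟩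
      · rw [List.take_succ_eq_append_getElem h]
        simp [pvReplace, pvReplace_nil]
      · have he : eidx < exp.length := by
          by_contra hge
          rw [List.drop_eq_nil_of_le (by omega)] at hed
          cases hed
        have hne : ¬ hyp[hidx] = "<unk>" := fun hhu => hc ⟨hgetD.trans hhu, he⟩
        have hrep : pvReplace (hyp[hidx] :: List.drop (hidx + 1) hyp) (e :: es)
            = hyp[hidx] :: pvReplace (List.drop (hidx + 1) hyp) (e :: es) := by
          simp [pvReplace, hne]
        rw [hrep, List.take_succ_eq_append_getElem h]
        simp only [List.append_assoc, List.singleton_append]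
  · rw [whileA, dif_neg h,
      List.drop_eq_nil_of_le (by omega), List.take_of_length_le (by omega)]
    simp [pvReplace]
termination_by hyp.length - hidx
decreasing_by all_goals simp_all; omega

theorem splitUnkB_ne_nil (ws : List String) : splitUnkB ws ≠ [] := by
  cases ws with
  | nil => simp [splitUnkB]
  | cons w ws => by_cases h : w = "<unk>" <;> simp [splitUnkB, h]

-- consing a word onto the first segment conses it onto the interleaved result
theorem interleaveB_cons_head (w : String) (s : List String) (rest : List (List String))
    (emr : List String) :
    interleaveB ((w :: s) :: rest) emr = w :: interleaveB (s :: rest) emr := by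
  cases rest with
  | nil => rfl
  | cons s2 r => cases emr <;> rfl

-- B's split-and-interleave computes pvReplace
theorem interleaveB_splitUnkB (ws emr : List String) :
    interleaveB (splitUnkB ws) emr = pvReplace ws emr := by
  induction ws generalizing emr with
  | nil => cases emr <;> rfl
  | cons w ws ih =>
    rcases hs : splitUnkB ws with _ | ⟨s, rest⟩
    · exact absurd hs (splitUnkB_ne_nil ws)
    · by_cases h : w = "<unk>"
      · subst h
        rw [show splitUnkB ("<unk>" :: ws) = [] :: s :: rest from by simp [splitUnkB, hs]]
        cases emr with
        | nil =>
          show "<unk>" :: interleaveB (s :: rest) [] = pvReplace ("<unk>" :: ws) []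
          have ih' : interleaveB (s :: rest) [] = pvReplace ws [] := by
            rw [← hs]; exact ih []
          rw [ih']; simp [pvReplace]
        | cons e es =>
          show e :: interleaveB (s :: rest) es = pvReplace ("<unk>" :: ws) (e :: es)
          have ih' : interleaveB (s :: rest) es = pvReplace ws es := by
            rw [← hs]; exact ih es
          rw [ih']; simp [pvReplace]
      · rw [show splitUnkB (w :: ws) = (w :: s) :: rest from by simp [splitUnkB, h, hs],
          show (w :: s) :: rest = (w :: s) :: rest from rfl]
        rw [interleaveB_cons_head, ← hs, ih]
        cases emr with
        | nil => simp [pvReplace]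
        | cons e es => simp [pvReplace, h]

-- ===== VERDICT (by name: the statement is the Claim_ definition above) =====
theorem try_method2_spec : Claim_equal_try_method2 := by
  intro example_ hypothesis _
  unfold Spec_try_method2 try_method2 try_method2_alt
  simp only []
  congr 1
  rw [whileA_eq_replace]
  simp only [List.take_zero, List.drop_zero, List.nil_append]
  rw [interleaveB_splitUnkB]
  congr 1
  rw [PySem.List.foldl_append_if_eq_filter]
  simp only [List.nil_append]
  exact List.filter_congr (fun w _ => containDigitA_eq_any w.toList)
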